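-- pv_equiv track=rewrite | github.com/lll-jy/cs3245-assign2 | search.py | get_operand
-- ===== SOURCE A (Python) =====
-- def get_operand(parsed_tokens, index):
--     """
--     given index of operator token in the parsed tokens list, get the operand before it
--     :param parsed_tokens: the list of tokens to evaluate after parsing
--     :param index: the operand to get from index position
--     :return: the full operand of the operator at index position in parsed tokens format
--     """
--     bi_ops = ['AND', 'OR']
--     while index > 0:
--         index = index - 1
--         if parsed_tokens[index] in bi_ops:
--             first_operand = get_operand(parsed_tokens, index)
--             second_operand = get_operand(parsed_tokens, index - len(first_operand))
--             return second_operand + first_operand + [parsed_tokens[index]]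
--         elif parsed_tokens[index] == 'NOT':
--             return get_operand(parsed_tokens, index) + ['NOT']
--         else:
--             return parsed_tokens[index:(index+1)]
-- ===== SOURCE B (Python) =====
-- def get_operand(parsed_tokens, index):
--     """
--     given index of operator token in the parsed tokens list, get the operand before it
--     """
--     if index <= 0:
--         return None
--     pos, need = index, 1
--     while need > 0:
--         pos -= 1
--         if pos < 0:
--             return None  # malformed postfix (A raises TypeError here)
--         t = parsed_tokens[pos]
--         if t in ('AND', 'OR'):
--             need += 1
--         elif t != 'NOT':
--             need -= 1
--     return parsed_tokens[pos:index]
-- ===== Notes on version B (the rewrite author's own statement) =====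
-- stated objective: alternative
-- what changed: A rebuilds the operand by recursing on every operator it meets, re-slicing and concatenating sublists (quadratic in the operand length on nested operators); B finds the operand's start boundary with a single backward operand-balance scan and returns one slice.
import Mathlib
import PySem

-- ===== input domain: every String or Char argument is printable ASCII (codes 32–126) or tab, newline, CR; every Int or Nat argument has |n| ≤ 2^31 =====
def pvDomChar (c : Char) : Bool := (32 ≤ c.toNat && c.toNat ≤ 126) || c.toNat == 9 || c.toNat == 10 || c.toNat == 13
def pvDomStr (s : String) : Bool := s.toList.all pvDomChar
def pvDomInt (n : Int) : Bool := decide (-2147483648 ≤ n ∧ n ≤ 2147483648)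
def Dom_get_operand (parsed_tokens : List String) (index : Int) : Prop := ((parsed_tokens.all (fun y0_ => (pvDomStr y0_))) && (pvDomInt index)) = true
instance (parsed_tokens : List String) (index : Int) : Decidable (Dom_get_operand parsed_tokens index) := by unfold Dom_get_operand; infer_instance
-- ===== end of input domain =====

-- B replaces A's recursive operand reconstruction (one recursive call per operator,
-- re-slicing and concatenating sublists) by a single backward balance-counting scan
-- that finds the operand's start boundary, then returns one slice (objective: alternative).

-- ===== PORT A =====
-- Literal port of A. A's `while index > 0:` body unconditionally returns, so it is a
-- single conditional; `index = index - 1` is written inline as `index - 1`. Where Python A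
-- raises (IndexError on parsed_tokens[index], or TypeError from len(None)/None + list when
-- a recursive call returns None) the port propagates `none`; Pre_get_operand excludes those.
def get_operand (parsed_tokens : List String) (index : Int) : Option (List String) :=
  if 0 < index then
    match PySem.List.pyGet? parsed_tokens (index - 1) with
    | none => none      -- Python: IndexError (excluded by Pre_)
    | some t =>
      if t = "AND" ∨ t = "OR" then
        match get_operand parsed_tokens (index - 1) with
        | none => none  -- Python: TypeError on len(None) (excluded by Pre_)
        | some first =>
          match get_operand parsed_tokens (index - 1 - (first.length : Int)) with
          | none => none  -- Python: TypeError on None + list (excluded by Pre_)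
          | some second => some (second ++ first ++ [t])
      else if t = "NOT" then
        match get_operand parsed_tokens (index - 1) with
        | none => none  -- Python: TypeError on None + list (excluded by Pre_)
        | some r => some (r ++ ["NOT"])
      else
        some (PySem.List.slice parsed_tokens (some (index - 1)) (some (index - 1 + 1)))
  else none
termination_by index.toNat
decreasing_by all_goals omega

-- ===== PORT B =====
-- Source B's while-loop: pos counts down, need is the operand balance; the loop-top test
-- `need > 0` and the updates need+1 / need-1 appear as the patterns need = 0 / need + 1
-- below.  `parsed_tokens[pos]` is ported as getD pos "" — exact for pos < len(parsed_tokens),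
-- which holds whenever index ≤ len(parsed_tokens) (Pre_); Source B raises IndexError outside that.
def findStart (parsed_tokens : List String) : Nat → Nat → Option Nat
  | pos, 0 => some pos
  | 0, _ + 1 => none
  | p + 1, need + 1 =>
    if parsed_tokens.getD p "" = "AND" ∨ parsed_tokens.getD p "" = "OR" then
      findStart parsed_tokens p (need + 2)
    else if parsed_tokens.getD p "" = "NOT" then findStart parsed_tokens p (need + 1)
    else findStart parsed_tokens p need

def get_operand_alt (parsed_tokens : List String) (index : Int) : Option (List String) :=
  if index ≤ 0 then none
  else
    match findStart parsed_tokens index.toNat 1 with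
    | none => none
    | some pos => some (PySem.List.slice parsed_tokens (some (pos : Int)) (some index))

-- ===== PRECONDITION & SPEC =====
def pvWeight (t : String) : Int := if t = "AND" ∨ t = "OR" then 1 else if t = "NOT" then 0 else -1

-- Pre_ excludes exactly the inputs on which Python A raises: index beyond the list
-- (IndexError), and a positive index with no balanced operand ending there, where A's
-- recursion returns None and A raises TypeError (len(None) / None + list).
def Pre_get_operand (parsed_tokens : List String) (index : Int) : Prop :=
  index ≤ parsed_tokens.length ∧
  (index ≤ 0 ∨ ∃ p ∈ List.range index.toNat,
      1 + (((parsed_tokens.drop p).take (index.toNat - p)).map pvWeight).sum = 0)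
instance (parsed_tokens : List String) (index : Int) : Decidable (Pre_get_operand parsed_tokens index) := by
  unfold Pre_get_operand; infer_instance

def pvWitness_get_operand : List String × Int := (["a", "b", "AND", "NOT"], 4)

def Spec_get_operand (parsed_tokens : List String) (index : Int) (out : Option (List String)) : Prop := out = get_operand_alt parsed_tokens index
instance (parsed_tokens : List String) (index : Int) (out : Option (List String)) : Decidable (Spec_get_operand parsed_tokens index out) := by unfold Spec_get_operand; infer_instance

-- ===== CLAIM (what is proved, stated in full; the proofs are below) =====
def Claim_equal_get_operand : Prop := ∀ (parsed_tokens : List String) (index : Int), Dom_get_operand parsed_tokens index → Pre_get_operand parsed_tokens index → Spec_get_operand parsed_tokens index (get_operand parsed_tokens index)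


-- ===== LEMMAS AND PROOFS =====

lemma findStart_need_zero (ts : List String) (pos : Nat) : findStart ts pos 0 = some pos := by
  cases pos <;> rfl

lemma findStart_succ (ts : List String) (p need : Nat) :
    findStart ts (p + 1) (need + 1) =
      if ts.getD p "" = "AND" ∨ ts.getD p "" = "OR" then findStart ts p (need + 2)
      else if ts.getD p "" = "NOT" then findStart ts p (need + 1)
      else findStart ts p need := rfl

lemma findStart_one (ts : List String) (p : Nat) :
    findStart ts (p + 1) 1 =
      if ts.getD p "" = "AND" ∨ ts.getD p "" = "OR" then findStart ts p 2
      else if ts.getD p "" = "NOT" then findStart ts p 1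
      else some p := by
  rw [show findStart ts (p + 1) 1 = findStart ts (p + 1) (0 + 1) from rfl, findStart_succ]
  simp [findStart_need_zero]

lemma findStart_le (ts : List String) :
    ∀ pos need q, findStart ts pos need = some q → q ≤ pos := by
  intro pos
  induction pos with
  | zero =>
    intro need q h
    cases need with
    | zero => rw [findStart_need_zero] at h; exact le_of_eq (Option.some.inj h).symm
    | succ n => simp [findStart] at h
  | succ p ih =>
    intro need q h
    cases need with
    | zero => rw [findStart_need_zero] at h; exact le_of_eq (Option.some.inj h).symm
    | succ n =>
      rw [findStart_succ] at h
      split_ifs at h <;> exact le_trans (ih _ _ h) (Nat.le_succ p)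

lemma findStart_split (ts : List String) :
    ∀ pos need, findStart ts pos (need + 1) =
      (findStart ts pos 1).bind (fun p => findStart ts p need) := by
  intro pos
  induction pos using Nat.strong_induction_on with
  | _ pos ih =>
    intro need
    match pos with
    | 0 => simp [findStart]
    | p + 1 =>
      rw [findStart_succ, findStart_one]
      split_ifs with h1 h2
      · -- AND/OR
        have e1 : findStart ts p (need + 2) =
            (findStart ts p 1).bind (fun q => findStart ts q (need + 1)) :=
          ih p (Nat.lt_succ_self p) (need + 1)
        have e2 : findStart ts p 2 =
            (findStart ts p 1).bind (fun q => findStart ts q 1) := ih p (Nat.lt_succ_self p) 1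
        rw [e1, e2, Option.bind_assoc]
        cases hfs : findStart ts p 1 with
        | none => simp
        | some q =>
          have hq : q ≤ p := findStart_le ts p 1 q hfs
          simp only [Option.bind_some]
          exact ih q (Nat.lt_succ_of_le hq) need
      · -- NOT
        exact ih p (Nat.lt_succ_self p) need
      · -- plain token
        simp

lemma slice_snoc (ts : List String) (q p : Nat) (hq : q ≤ p) (hp : p < ts.length) :
    PySem.List.slice ts (some (q : Int)) (some ((p : Int) + 1)) =
      PySem.List.slice ts (some (q : Int)) (some (p : Int)) ++ [ts[p]] := by
  have h1 : ((p : Int) + 1) = ((p + 1 : Nat) : Int) := by push_cast; ring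
  rw [h1, PySem.List.slice_natCast, PySem.List.slice_natCast]
  have h2 : p + 1 - q = (p - q) + 1 := by omega
  rw [h2, List.take_add_one]
  congr 1
  have h3 : p - q < (ts.drop q).length := by simp [List.length_drop]; omega
  rw [List.getElem?_eq_getElem h3]
  simp [List.getElem_drop, Nat.add_sub_cancel' hq]

lemma slice_glue (ts : List String) (r q p : Nat) (h1 : r ≤ q) (h2 : q ≤ p) :
    PySem.List.slice ts (some (r : Int)) (some (q : Int)) ++
      PySem.List.slice ts (some (q : Int)) (some (p : Int)) =
      PySem.List.slice ts (some (r : Int)) (some (p : Int)) := by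
  rw [PySem.List.slice_natCast, PySem.List.slice_natCast, PySem.List.slice_natCast]
  have hd : ts.drop q = (ts.drop r).drop (q - r) := by
    rw [List.drop_drop]; congr 1; omega
  rw [hd]
  have hsum : p - r = (q - r) + (p - q) := by omega
  rw [hsum, List.take_add]

lemma slice_length (ts : List String) (q p : Nat) (_hq : q ≤ p) (hp : p ≤ ts.length) :
    (PySem.List.slice ts (some (q : Int)) (some (p : Int))).length = p - q := by
  rw [PySem.List.slice_natCast]
  simp [List.length_take, List.length_drop]
  omega

lemma get_operand_main (ts : List String) :
    ∀ pos : Nat, pos ≤ ts.length →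
      get_operand ts (pos : Int) =
        match findStart ts pos 1 with
        | none => none
        | some p => some (PySem.List.slice ts (some (p : Int)) (some (pos : Int))) := by
  intro pos
  induction pos using Nat.strong_induction_on with
  | _ pos ih =>
    intro hlen
    match pos with
    | 0 =>
      rw [get_operand]
      simp [findStart]
    | p + 1 =>
      have hp : p < ts.length := by omega
      rw [get_operand]
      have hpos : (0 : Int) < ((p + 1 : Nat) : Int) := by push_cast; omega
      rw [if_pos hpos]
      have hi : ((p + 1 : Nat) : Int) - 1 = (p : Int) := by push_cast; ring
      rw [hi]
      rw [show PySem.List.pyGet? ts (p : Int) = some ts[p] from by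
        simp [PySem.List.pyGet?_natCast, List.getElem?_eq_getElem hp]]
      rw [findStart_one, show ts.getD p "" = ts[p] from List.getD_eq_getElem ts "" hp]
      dsimp only
      split_ifs with h1 h2
      · -- AND / OR
        rw [show (2 : Nat) = 1 + 1 from rfl, findStart_split ts p 1]
        rw [ih p (Nat.lt_succ_self p) (le_of_lt hp)]
        cases hfs : findStart ts p 1 with
        | none => simp
        | some q =>
          have hq : q ≤ p := findStart_le ts p 1 q hfs
          dsimp only [Option.bind_some]
          have hlenfirst :
              (PySem.List.slice ts (some (q : Int)) (some (p : Int))).length = p - q :=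
            slice_length ts q p hq (le_of_lt hp)
          rw [hlenfirst]
          have harg : (p : Int) - ((p - q : Nat) : Int) = (q : Int) := by
            push_cast [hq]; ring
          rw [harg, ih q (Nat.lt_succ_of_le hq) (le_trans hq (le_of_lt hp))]
          cases hfs2 : findStart ts q 1 with
          | none => simp
          | some r =>
            have hr : r ≤ q := findStart_le ts q 1 r hfs2
            dsimp only
            congr 1
            rw [show ((p + 1 : Nat) : Int) = (p : Int) + 1 from by push_cast; ring]
            rw [slice_snoc ts r p (le_trans hr hq) hp,
              ← slice_glue ts r q p hr hq]
      · -- NOT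
        rw [ih p (Nat.lt_succ_self p) (le_of_lt hp)]
        cases hfs : findStart ts p 1 with
        | none => simp
        | some q =>
          have hq : q ≤ p := findStart_le ts p 1 q hfs
          dsimp only
          congr 1
          rw [show ((p + 1 : Nat) : Int) = (p : Int) + 1 from by push_cast; ring]
          rw [slice_snoc ts q p hq hp, h2]
      · -- plain token
        dsimp only
        rw [show ((p + 1 : Nat) : Int) = (p : Int) + 1 from by push_cast; ring]

-- ===== VERDICT (by name: the statement is the Claim_ definition above) =====
theorem get_operand_spec : Claim_equal_get_operand := by
  intro ts index _ hpre
  unfold Spec_get_operand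
  obtain ⟨hlen, _⟩ := hpre
  by_cases hle : index ≤ 0
  · rw [get_operand, get_operand_alt, if_pos hle, if_neg (by omega)]
  · have hnat : index.toNat ≤ ts.length := by omega
    have h2 := get_operand_main ts index.toNat hnat
    rw [Int.toNat_of_nonneg (by omega : (0 : Int) ≤ index)] at h2
    rw [get_operand_alt, if_neg hle, h2]
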